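-- pv_equiv track=rewrite | github.com/cjsindt/aoc_2023 | 2/cjsindt/2.py | determine_possibility
-- ===== SOURCE A (Python) =====
-- RED = 12
--
-- GREEN = 13
--
-- BLUE = 14
--
-- def determine_possibility(game):
--     for s in game:
--         for c in game[s]:
--             if c == 'red':
--                 if game[s][c] > RED:
--                     return False
--             if c == 'green':
--                 if game[s][c] > GREEN:
--                     return False
--             if c == 'blue':
--                 if game[s][c] > BLUE:
--                     return False
--
--     return True
-- ===== SOURCE B (Python) =====
-- RED = 12
--
-- GREEN = 13
--
-- BLUE = 14
--
-- def determine_possibility(game):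
--     maxes = {}
--     for counts in game.values():
--         for color, n in counts.items():
--             if n > maxes.get(color, 0):
--                 maxes[color] = n
--     for color, limit in (('red', RED), ('green', GREEN), ('blue', BLUE)):
--         if maxes.get(color, 0) > limit:
--             return False
--     return True
-- ===== Notes on version B (the rewrite author's own statement) =====
-- stated objective: alternative
-- what changed: B replaces A's single nested early-exit scan that compares each entry against its limit in place by a two-phase structure: one pass aggregating a dict of per-colour maxima over the whole game, then a separate loop over a fixed limits table judging the maxima.
import Mathlib
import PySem

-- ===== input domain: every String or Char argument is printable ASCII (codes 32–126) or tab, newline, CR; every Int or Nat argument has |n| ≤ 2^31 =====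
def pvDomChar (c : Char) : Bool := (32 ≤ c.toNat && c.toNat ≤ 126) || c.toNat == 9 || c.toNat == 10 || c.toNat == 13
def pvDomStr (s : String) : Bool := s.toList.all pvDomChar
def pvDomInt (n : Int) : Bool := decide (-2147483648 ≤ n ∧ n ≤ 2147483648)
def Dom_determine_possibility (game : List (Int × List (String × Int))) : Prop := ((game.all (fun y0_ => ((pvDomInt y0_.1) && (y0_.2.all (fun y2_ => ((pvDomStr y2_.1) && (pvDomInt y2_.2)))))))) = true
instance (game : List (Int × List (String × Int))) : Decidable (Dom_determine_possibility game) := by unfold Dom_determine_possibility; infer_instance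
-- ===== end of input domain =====

-- B replaces A's per-entry early-exit limit scan by a two-phase gather-then-judge pass:
-- first aggregate the per-colour maxima over the whole game, then check a fixed limits
-- table; objective: alternative decomposition, same cost.

-- module constants RED / GREEN / BLUE
def pvRED : Int := 12
def pvGREEN : Int := 13
def pvBLUE : Int := 14

-- ===== PORT A =====
-- 'for c in game[s]': iterate the keys of the inner dict, looking each value up by key.
-- The looked-up key always comes from the same dict, so the getD default 0 is unreachable.
def dpA_colors (full : List (String × Int)) : List (String × Int) → Bool
  | [] => true
  | (c, _) :: rest =>
    if c = "red" && (PySem.Dict.mk full).getD c 0 > pvRED then false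
    else if c = "green" && (PySem.Dict.mk full).getD c 0 > pvGREEN then false
    else if c = "blue" && (PySem.Dict.mk full).getD c 0 > pvBLUE then false
    else dpA_colors full rest

-- 'for s in game': iterate the keys, 'game[s]' looked up by key (default [] unreachable).
def dpA_subsets (game : List (Int × List (String × Int))) : List (Int × List (String × Int)) → Bool
  | [] => true
  | (s, _) :: rest =>
    let counts := (PySem.Dict.mk game).getD s []
    if dpA_colors counts counts then dpA_subsets game rest else false

def determine_possibility (game : List (Int × List (String × Int))) : Bool :=
  dpA_subsets game game

-- ===== PORT B =====
-- phase 2: loop over the fixed limits table, early return False on an exceeded limit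
def dpB_check (maxes : PySem.Dict String Int) : List (String × Int) → Bool
  | [] => true
  | (color, limit) :: rest =>
    if maxes.getD color 0 > limit then false else dpB_check maxes rest

def determine_possibility_alt (game : List (Int × List (String × Int))) : Bool :=
  -- phase 1: gather the maximum seen count per colour across all subsets
  let maxes : PySem.Dict String Int :=
    game.foldl (fun m p =>
      p.2.foldl (fun m q => if q.2 > m.getD q.1 0 then m.insert q.1 q.2 else m) m)
      PySem.Dict.empty
  dpB_check maxes [("red", pvRED), ("green", pvGREEN), ("blue", pvBLUE)]

-- ===== PRECONDITION & SPEC =====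
-- Pre_ excludes association lists with a duplicate outer key or a duplicate key inside an
-- inner list: such lists do not represent a Python dict (a real dict has unique keys), and
-- A's key-lookup iteration versus B's items iteration disagree there only as an artefact of
-- the dict-as-list encoding.
def Pre_determine_possibility (game : List (Int × List (String × Int))) : Prop :=
  (game.map Prod.fst).Nodup ∧ ∀ p ∈ game, (p.2.map Prod.fst).Nodup
instance (game : List (Int × List (String × Int))) : Decidable (Pre_determine_possibility game) := by
  unfold Pre_determine_possibility; infer_instance

def pvWitness_determine_possibility : (List (Int × List (String × Int))) :=
  [(1, [("red", 3), ("blue", 2)]), (2, [("green", 13)])]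

def Spec_determine_possibility (game : List (Int × List (String × Int))) (out : Bool) : Prop := out = determine_possibility_alt game
instance (game : List (Int × List (String × Int))) (out : Bool) : Decidable (Spec_determine_possibility game out) := by unfold Spec_determine_possibility; infer_instance

-- ===== CLAIM (what is proved, stated in full; the proofs are below) =====
def Claim_equal_determine_possibility : Prop := ∀ (game : List (Int × List (String × Int))), Dom_determine_possibility game → Pre_determine_possibility game → Spec_determine_possibility game (determine_possibility game)

-- ===== LEMMAS AND PROOFS =====

-- the common specification both programs decide
def dpOK (q : String × Int) : Prop :=
  (q.1 = "red" → q.2 ≤ pvRED) ∧ (q.1 = "green" → q.2 ≤ pvGREEN) ∧ (q.1 = "blue" → q.2 ≤ pvBLUE)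

theorem dpB_inner_le (qs : List (String × Int)) (m : PySem.Dict String Int) (c : String) (L : Int) :
    ((qs.foldl (fun m q => if q.2 > m.getD q.1 0 then m.insert q.1 q.2 else m) m).getD c 0 ≤ L)
      ↔ (m.getD c 0 ≤ L ∧ ∀ q ∈ qs, q.1 = c → q.2 ≤ L) := by
  induction qs generalizing m with
  | nil => simp
  | cons q rest ih =>
    simp only [List.foldl_cons, ih, List.mem_cons, forall_eq_or_imp]
    constructor
    · rintro ⟨h1, h2⟩
      split at h1
      · rw [PySem.Dict.getD_insert] at h1
        by_cases hc : c = q.1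
        · subst hc; simp at h1; refine ⟨by omega, by intro _; omega, h2⟩
        · simp [hc] at h1; exact ⟨h1, fun h => absurd h.symm hc, h2⟩
      · refine ⟨h1, ?_, h2⟩; intro hq; rename_i hle; rw [hq] at hle; omega
    · rintro ⟨h1, hq, h2⟩
      refine ⟨?_, h2⟩
      split
      · rw [PySem.Dict.getD_insert]
        by_cases hc : c = q.1
        · simp [hc]; exact hq hc.symm
        · simp [hc]; exact h1
      · exact h1

theorem dpB_outer_le (g : List (Int × List (String × Int))) (m : PySem.Dict String Int) (c : String) (L : Int) :
    ((g.foldl (fun m p => p.2.foldl (fun m q => if q.2 > m.getD q.1 0 then m.insert q.1 q.2 else m) m) m).getD c 0 ≤ L)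
      ↔ (m.getD c 0 ≤ L ∧ ∀ p ∈ g, ∀ q ∈ p.2, q.1 = c → q.2 ≤ L) := by
  induction g generalizing m with
  | nil => simp
  | cons p rest ih =>
    simp only [List.foldl_cons, ih, dpB_inner_le, List.mem_cons, forall_eq_or_imp]
    tauto

theorem dpB_true (game : List (Int × List (String × Int))) :
    determine_possibility_alt game = true ↔ ∀ p ∈ game, ∀ q ∈ p.2, dpOK q := by
  unfold determine_possibility_alt dpOK
  simp only [dpB_check]
  constructor
  · intro h
    split_ifs at h
    rename_i h1 h2 h3
    simp only [not_lt] at h1 h2 h3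
    rw [dpB_outer_le] at h1 h2 h3
    intro p hp q hq
    exact ⟨fun hc => (h1.2 p hp q hq) hc, fun hc => (h2.2 p hp q hq) hc, fun hc => (h3.2 p hp q hq) hc⟩
  · intro h
    have h1 : _ ≤ pvRED := (dpB_outer_le game PySem.Dict.empty "red" pvRED).2
      ⟨by simp [pvRED], fun p hp q hq hc => (h p hp q hq).1 hc⟩
    have h2 : _ ≤ pvGREEN := (dpB_outer_le game PySem.Dict.empty "green" pvGREEN).2
      ⟨by simp [pvGREEN], fun p hp q hq hc => (h p hp q hq).2.1 hc⟩
    have h3 : _ ≤ pvBLUE := (dpB_outer_le game PySem.Dict.empty "blue" pvBLUE).2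
      ⟨by simp [pvBLUE], fun p hp q hq hc => (h p hp q hq).2.2 hc⟩
    simp only [not_lt.2 h1, not_lt.2 h2, not_lt.2 h3, if_false]

theorem dpA_colors_true (full : List (String × Int)) (hnd : (full.map Prod.fst).Nodup)
    (rest : List (String × Int)) (hsub : ∀ q ∈ rest, q ∈ full) :
    dpA_colors full rest = true ↔ ∀ q ∈ rest, dpOK q := by
  induction rest with
  | nil => simp [dpA_colors]
  | cons q rest ih =>
    obtain ⟨c, v⟩ := q
    have hmem : (c, v) ∈ full := hsub _ (List.mem_cons_self ..)
    have hget : (PySem.Dict.mk full).getD c 0 = v :=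
      PySem.Dict.getD_of_mem_items (d := PySem.Dict.mk full) hmem (by simpa using hnd) 0
    have ih' := ih (fun q hq => hsub q (List.mem_cons_of_mem _ hq))
    simp only [dpA_colors, hget, List.mem_cons, forall_eq_or_imp]
    by_cases hr : c = "red" <;> by_cases hg : c = "green" <;> by_cases hb : c = "blue" <;>
      simp_all [dpOK]

theorem dpA_subsets_true (game : List (Int × List (String × Int)))
    (hnd : (game.map Prod.fst).Nodup) (hin : ∀ p ∈ game, (p.2.map Prod.fst).Nodup)
    (rest : List (Int × List (String × Int))) (hsub : ∀ p ∈ rest, p ∈ game) :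
    dpA_subsets game rest = true ↔ ∀ p ∈ rest, ∀ q ∈ p.2, dpOK q := by
  induction rest with
  | nil => simp [dpA_subsets]
  | cons p rest ih =>
    obtain ⟨s, counts⟩ := p
    have hmem : (s, counts) ∈ game := hsub _ (List.mem_cons_self ..)
    have hget : (PySem.Dict.mk game).getD s [] = counts :=
      PySem.Dict.getD_of_mem_items (d := PySem.Dict.mk game) hmem (by simpa using hnd) []
    have ih' := ih (fun p hp => hsub p (List.mem_cons_of_mem _ hp))
    have hcol := dpA_colors_true counts (hin _ hmem) counts (fun _ h => h)
    simp only [dpA_subsets, hget, List.mem_cons, forall_eq_or_imp]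
    split_ifs with h
    · rw [ih']
      have hc := hcol.mp h
      exact ⟨fun hr => ⟨fun q hq => hc q hq, hr⟩, fun hr => hr.2⟩
    · simp only [false_iff, not_and]
      intro hq; exact absurd (hcol.mpr hq) (by simp [h])

-- ===== VERDICT (by name: the statement is the Claim_ definition above) =====
theorem determine_possibility_spec : Claim_equal_determine_possibility := by
  intro game _ hpre
  unfold Spec_determine_possibility determine_possibility
  rw [Bool.eq_iff_iff, dpB_true,
    dpA_subsets_true game hpre.1 hpre.2 game (fun _ h => h)]
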